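-- pv_equiv track=rewrite | github.com/thegitofdaniel/python-exercises | USP - Python II/semana2_tarefa2.py | menor_nome
-- ===== SOURCE A (Python) =====
-- def menor_nome(nomes):
--
-- 	min = len(nomes[0].replace(" ",""))
-- 	menor_nome = nomes[0].replace(" ","")
--
-- 	for i in nomes:
-- 		aux = len(i.replace(" ",""))
-- 		if aux < min:
-- 			min = aux
-- 			menor_nome = i.replace(" ","")
-- 		else:
-- 			pass
-- 	return(menor_nome.capitalize())
-- ===== SOURCE B (Python) =====
-- def menor_nome(nomes):
--     ordered = sorted(nomes, key=lambda s: len(s.replace(" ", "")))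
--     return ordered[0].replace(" ", "").capitalize()
-- ===== Notes on version B (the rewrite author's own statement) =====
-- stated objective: alternative
-- what changed: B stable-sorts the names by space-stripped length and takes the first of the ordering, instead of A's running-minimum loop with explicit min/name state; sort stability reproduces A's strict '<' tie-breaking (first minimum).
import Mathlib
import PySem

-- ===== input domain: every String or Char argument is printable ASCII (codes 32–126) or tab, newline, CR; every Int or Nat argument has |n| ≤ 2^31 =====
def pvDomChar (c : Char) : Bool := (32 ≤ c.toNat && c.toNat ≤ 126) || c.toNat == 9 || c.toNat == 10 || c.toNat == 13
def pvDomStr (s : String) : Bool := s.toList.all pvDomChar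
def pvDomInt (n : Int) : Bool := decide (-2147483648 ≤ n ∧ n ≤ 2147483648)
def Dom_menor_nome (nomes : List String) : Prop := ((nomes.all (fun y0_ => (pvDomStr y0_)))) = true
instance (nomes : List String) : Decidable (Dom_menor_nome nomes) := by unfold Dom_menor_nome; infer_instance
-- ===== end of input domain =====

-- B replaces A's running-minimum loop by a stable sort on the space-stripped length and takes its first element (objective: alternative decomposition, same result).

-- str.capitalize(): first char uppercased, the rest lowercased (exact on the ASCII domain).
def pyCapitalize (s : String) : String :=
  match s.toList with
  | [] => s
  | c :: rest => String.ofList (PySem.Chars.upperChar c :: PySem.Chars.lower rest)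

-- ===== PORT A =====
def menor_nome (nomes : List String) : String :=
  match nomes with
  | [] => ""   -- nomes[0] raises IndexError in Python; excluded by Pre_
  | n0 :: _ =>
    let st := nomes.foldl
      (fun (st : Int × String) i =>
        let aux := PySem.Str.len (PySem.Str.replace i " " "")
        if aux < st.1 then (aux, PySem.Str.replace i " " "") else st)
      (PySem.Str.len (PySem.Str.replace n0 " " ""), PySem.Str.replace n0 " " "")
    pyCapitalize st.2

-- ===== PORT B =====
def menor_nome_alt (nomes : List String) : String :=
  let ordered := PySem.List.sorted nomes (fun s => PySem.Str.len (PySem.Str.replace s " " "")) false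
  match ordered with
  | [] => ""   -- ordered[0] raises IndexError in Python; excluded by Pre_
  | m :: _ => pyCapitalize (PySem.Str.replace m " " "")

-- ===== PRECONDITION & SPEC =====
-- Pre_ excludes only the empty list, on which A raises IndexError (nomes[0]).
def Pre_menor_nome (nomes : List String) : Prop := nomes ≠ []
instance (nomes : List String) : Decidable (Pre_menor_nome nomes) := by unfold Pre_menor_nome; infer_instance
def pvWitness_menor_nome : List String := ["Ana Maria", "Jo", "Bea"]

def Spec_menor_nome (nomes : List String) (out : String) : Prop := out = menor_nome_alt nomes
instance (nomes : List String) (out : String) : Decidable (Spec_menor_nome nomes out) := by unfold Spec_menor_nome; infer_instance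

-- ===== CLAIM (what is proved, stated in full; the proofs are below) =====
def Claim_equal_menor_nome : Prop := ∀ (nomes : List String), Dom_menor_nome nomes → Pre_menor_nome nomes → Spec_menor_nome nomes (menor_nome nomes)

-- ===== LEMMAS AND PROOFS =====
-- the space-stripped length, A's and B's common sort/minimum key
def pvKey (s : String) : Int := PySem.Str.len (PySem.Str.replace s " " "")

-- A's loop body, named
def pvFA (st : Int × String) (i : String) : Int × String :=
  if pvKey i < st.1 then (pvKey i, PySem.Str.replace i " " "") else st

-- B's insertion step (insertion sort via sorted_eq_foldl_insertBy), named
def pvIns (acc : List String) (x : String) : List String :=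
  PySem.List.insertBy (fun a b => decide (pvKey a < pvKey b)) x acc

-- the first element of b :: xs with strictly minimal key
def pvRunMin (b : String) (xs : List String) : String :=
  xs.foldl (fun b i => if pvKey i < pvKey b then i else b) b

theorem pvA_fold (xs : List String) : ∀ b : String,
    xs.foldl pvFA (pvKey b, PySem.Str.replace b " " "")
      = (pvKey (pvRunMin b xs), PySem.Str.replace (pvRunMin b xs) " " "") := by
  induction xs with
  | nil => intro b; rfl
  | cons x xs ih =>
    intro b
    by_cases h : pvKey x < pvKey b
    · simpa [pvRunMin, pvFA, List.foldl_cons, h] using ih x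
    · simpa [pvRunMin, pvFA, List.foldl_cons, h] using ih b

theorem pvB_head (xs : List String) : ∀ (m : String) (t : List String),
    ∃ t', xs.foldl pvIns (m :: t) = pvRunMin m xs :: t' := by
  induction xs with
  | nil => intro m t; exact ⟨t, rfl⟩
  | cons x xs ih =>
    intro m t
    by_cases h : pvKey x < pvKey m
    · obtain ⟨t', ht'⟩ := ih x (m :: t)
      exact ⟨t', by simpa [pvRunMin, pvIns, PySem.List.insertBy, List.foldl_cons, h] using ht'⟩
    · obtain ⟨t', ht'⟩ := ih m (pvIns t x)
      exact ⟨t', by simpa [pvRunMin, pvIns, PySem.List.insertBy, List.foldl_cons, h] using ht'⟩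

theorem menor_nome_spec : Claim_equal_menor_nome := by
  intro nomes _ hpre
  unfold Spec_menor_nome
  match nomes with
  | [] => exact absurd rfl hpre
  | n0 :: rest =>
    obtain ⟨t', ht'⟩ := pvB_head rest n0 []
    have hsorted : PySem.List.sorted (n0 :: rest)
        (fun s => PySem.Str.len (PySem.Str.replace s " " "")) false
        = pvRunMin n0 rest :: t' := by
      rw [PySem.List.sorted_eq_foldl_insertBy, List.foldl_cons]
      exact ht'
    have hA : (n0 :: rest).foldl pvFA
        (pvKey n0, PySem.Str.replace n0 " " "")
        = (pvKey (pvRunMin n0 rest), PySem.Str.replace (pvRunMin n0 rest) " " "") := by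
      rw [List.foldl_cons, show pvFA (pvKey n0, PySem.Str.replace n0 " " "") n0
            = (pvKey n0, PySem.Str.replace n0 " " "") from by simp [pvFA]]
      exact pvA_fold rest n0
    have hAport : menor_nome (n0 :: rest)
        = pyCapitalize ((n0 :: rest).foldl pvFA (pvKey n0, PySem.Str.replace n0 " " "")).2 := rfl
    have hBport : menor_nome_alt (n0 :: rest)
        = pyCapitalize (PySem.Str.replace (pvRunMin n0 rest) " " "") := by
      simp only [menor_nome_alt]
      rw [hsorted]
    rw [hAport, hA, hBport]
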